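-- pv_equiv track=rewrite | github.com/DeepWok/mase | machop/mase_components/fixed_arithmetic/test/fixed_range_reduction_tb.py | range_reduction_sw
-- ===== SOURCE A (Python) =====
-- def range_reduction_sw(x: int, width: int) -> int:
--     """model of range reduction for isqrt"""
--     # Find MSB
--     # NOTE: if the input is 0 then consider msb index as width-1.
--     msb_index = width-1
--     for i in range(1, width+1):
--         power = 2 ** (width - i)
--         if power <= x:
--             msb_index = width - i
--             break
--     res = x
--     if msb_index < (width - 1):
--         res = res * 2 ** (width - 1 - msb_index)
--
--     return res
-- ===== SOURCE B (Python) =====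
-- def range_reduction_sw(x: int, width: int) -> int:
--     """model of range reduction for isqrt: double x until its top bit is at width-1"""
--     res = x
--     if width >= 1:
--         bound = 1 << (width - 1)
--         while 0 < res < bound:
--             res *= 2
--     return res
-- ===== Notes on version B (the rewrite author's own statement) =====
-- stated objective: simpler
-- what changed: Replaces A's two-phase find-the-MSB-index-then-shift with a single guarded doubling loop (res *= 2 until res leaves (0, 2**(width-1))), with no index search at all.
import Mathlib
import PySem

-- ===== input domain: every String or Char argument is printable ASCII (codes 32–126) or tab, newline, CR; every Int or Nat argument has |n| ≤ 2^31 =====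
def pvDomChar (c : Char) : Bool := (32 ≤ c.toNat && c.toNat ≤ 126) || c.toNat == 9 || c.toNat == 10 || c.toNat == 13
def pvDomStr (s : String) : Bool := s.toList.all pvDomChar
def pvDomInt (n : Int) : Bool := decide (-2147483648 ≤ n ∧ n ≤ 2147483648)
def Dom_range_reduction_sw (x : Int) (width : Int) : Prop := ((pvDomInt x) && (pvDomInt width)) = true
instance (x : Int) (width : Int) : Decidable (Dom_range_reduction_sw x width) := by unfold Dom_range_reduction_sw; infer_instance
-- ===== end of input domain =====

-- B replaces A's find-MSB-index-then-shift with a single guarded doubling loop (simpler decomposition, no index search).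

-- ===== PORT A =====
-- the 'for i in range(1, width+1)' loop with break: first i whose power 2**(width-i) is ≤ x
-- gives msb_index = width-i; no hit leaves the default width-1. Exponent (width-i) is ≥ 0 for
-- every i the range produces, so .toNat is exact there.
def rrMsbLoop (x width : Int) : List Int → Int
  | [] => width - 1
  | i :: rest => if (2:Int) ^ (width - i).toNat ≤ x then width - i else rrMsbLoop x width rest

def range_reduction_sw (x : Int) (width : Int) : Int :=
  let msb_index := rrMsbLoop x width (PySem.List.pyRange 1 (width+1) 1)
  if msb_index < width - 1 then x * 2 ^ (width - 1 - msb_index).toNat else x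

-- ===== PORT B =====
-- 'while 0 < res < bound: res *= 2'
def rrDouble (bound : Int) (res : Int) : Int :=
  if h : 0 < res ∧ res < bound then rrDouble bound (res * 2) else res
termination_by (bound - res).toNat
decreasing_by obtain ⟨h1, h2⟩ := h; omega

-- 'bound = 1 << (width-1)'; exponent width-1 ≥ 0 under the guard, so .toNat is exact.
def range_reduction_sw_alt (x : Int) (width : Int) : Int :=
  if 1 ≤ width then rrDouble ((2:Int) ^ (width - 1).toNat) x else x

-- ===== PRECONDITION & SPEC =====
def Spec_range_reduction_sw (x : Int) (width : Int) (out : Int) : Prop := out = range_reduction_sw_alt x width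
instance (x : Int) (width : Int) (out : Int) : Decidable (Spec_range_reduction_sw x width out) := by unfold Spec_range_reduction_sw; infer_instance

-- ===== CLAIM (what is proved, stated in full; the proofs are below) =====
def Claim_equal_range_reduction_sw : Prop := ∀ (x : Int) (width : Int), Dom_range_reduction_sw x width → Spec_range_reduction_sw x width (range_reduction_sw x width)

-- ===== LEMMAS AND PROOFS =====

-- A's loop finds no hit when x ≤ 0 (every power is positive)
theorem rrMsbLoop_nonpos (x width : Int) (hx : x ≤ 0) : ∀ l, rrMsbLoop x width l = width - 1 := by
  intro l
  induction l with
  | nil => rfl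
  | cons i rest ih =>
    have hp : (0:Int) < 2 ^ (width - i).toNat := by positivity
    simp [rrMsbLoop, ih]
    omega

-- A's loop over range(j, width+1): for 0 < x < 2^(width-j+1) it returns the MSB index m
theorem rrMsbLoop_spec (x width : Int) (hx : 0 < x) :
    ∀ n : Nat, ∀ j : Int, (width - j).toNat = n → 1 ≤ j → j ≤ width →
    x < 2 ^ (width - j + 1).toNat →
    ∃ m : Int, rrMsbLoop x width (PySem.List.pyRange j (width+1) 1) = m ∧
      (2:Int) ^ m.toNat ≤ x ∧ x < 2 ^ (m.toNat + 1) ∧ 0 ≤ m ∧ m ≤ width - j := by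
  intro n
  induction n with
  | zero =>
    intro j h0 hj1 hjw hub
    have hje : width - j = 0 := by omega
    rw [PySem.List.pyRange_one_cons (by omega)]
    have ht : (2:Int) ^ (width - j).toNat ≤ x := by
      rw [hje]; simpa using hx
    refine ⟨width - j, by simp [rrMsbLoop, ht], ht, ?_, by omega, by omega⟩
    have h1 : (width - j + 1).toNat = (width - j).toNat + 1 := by omega
    rw [h1] at hub; exact hub
  | succ n ih =>
    intro j h0 hj1 hjw hub
    rw [PySem.List.pyRange_one_cons (by omega)]
    by_cases ht : (2:Int) ^ (width - j).toNat ≤ x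
    · refine ⟨width - j, by simp [rrMsbLoop, ht], ht, ?_, by omega, by omega⟩
      have h1 : (width - j + 1).toNat = (width - j).toNat + 1 := by omega
      rw [h1] at hub; exact hub
    · have hjlt : j < width := by omega
      obtain ⟨m, hm, h1, h2, h3, h4⟩ := ih (j + 1) (by omega) (by omega) (by omega)
        (by
          have : (width - (j + 1) + 1).toNat = (width - j).toNat := by omega
          rw [this]; omega)
      exact ⟨m, by simp [rrMsbLoop, ht, hm], h1, h2, h3, by omega⟩

-- B's loop: starting inside (0, bound) it lands in [bound, 2*bound) by doubling
theorem rrDouble_spec (bound : Int) :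
    ∀ n : Nat, ∀ res : Int, (bound - res).toNat ≤ n → 0 < res → res < bound →
    ∃ k : Nat, rrDouble bound res = res * 2 ^ k ∧ bound ≤ res * 2 ^ k ∧ res * 2 ^ k < 2 * bound := by
  intro n
  induction n with
  | zero => intro res h0 h1 h2; omega
  | succ n ih =>
    intro res h0 h1 h2
    rw [rrDouble, dif_pos ⟨h1, h2⟩]
    by_cases hb : res * 2 < bound
    · obtain ⟨k, hk, hlo, hhi⟩ := ih (res * 2) (by omega) (by omega) hb
      have he : res * 2 ^ (k + 1) = res * 2 * 2 ^ k := by rw [pow_succ]; ring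
      exact ⟨k + 1, by rw [hk, he], by rw [he]; exact hlo, by rw [he]; exact hhi⟩
    · rw [rrDouble, dif_neg (by omega)]
      exact ⟨1, by ring, by omega, by omega⟩

-- rrDouble returns its argument unchanged when the guard fails
theorem rrDouble_id (bound res : Int) (h : ¬ (0 < res ∧ res < bound)) : rrDouble bound res = res := by
  rw [rrDouble, dif_neg h]

-- uniqueness of the normalized value: at most one power-of-two multiple of x lies in [b, 2b)
theorem pow_mul_unique (x b : Int) (p q : Nat) (hx : 0 < x)
    (hp1 : b ≤ x * 2 ^ p) (hp2 : x * 2 ^ p < 2 * b)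
    (hq1 : b ≤ x * 2 ^ q) (hq2 : x * 2 ^ q < 2 * b) : x * 2 ^ p = x * 2 ^ q := by
  rcases Nat.lt_trichotomy p q with h | h | h
  · exfalso
    have : x * 2 ^ (p + 1) ≤ x * 2 ^ q := by
      have := pow_le_pow_right₀ (by norm_num : (1:Int) ≤ 2) (by omega : p + 1 ≤ q)
      exact mul_le_mul_of_nonneg_left this (by omega)
    rw [pow_succ] at this; nlinarith
  · rw [h]
  · exfalso
    have : x * 2 ^ (q + 1) ≤ x * 2 ^ p := by
      have := pow_le_pow_right₀ (by norm_num : (1:Int) ≤ 2) (by omega : q + 1 ≤ p)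
      exact mul_le_mul_of_nonneg_left this (by omega)
    rw [pow_succ] at this; nlinarith

-- ===== VERDICT (by name: the statement is the Claim_ definition above) =====
theorem range_reduction_sw_spec : Claim_equal_range_reduction_sw := by
  intro x width _
  unfold Spec_range_reduction_sw range_reduction_sw range_reduction_sw_alt
  by_cases hw : 1 ≤ width
  · rw [if_pos hw]
    set bound : Int := (2:Int) ^ (width - 1).toNat with hbound
    by_cases hx : 0 < x
    · by_cases hxb : x < bound
      · -- the interesting case: 0 < x < 2^(width-1)
        obtain ⟨m, hm, hle, hlt, hm0, hmw⟩ :=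
          rrMsbLoop_spec x width hx (width - 1).toNat 1 (by omega) le_rfl hw
            (by
              have h1 : x < 2 ^ ((width - 1).toNat + 1) := by
                calc x < bound := hxb
                  _ ≤ 2 ^ ((width - 1).toNat + 1) := by
                      rw [hbound, pow_succ]; nlinarith [pow_pos (by norm_num : (0:Int) < 2) (width - 1).toNat]
              have : (width - 1 + 1).toNat = (width - 1).toNat + 1 := by omega
              rw [this]; exact h1)
        have hmlt : m < width - 1 := by
          by_contra hge
          have hmeq : m = width - 1 := by omega
          rw [hmeq] at hle
          have : (width - 1).toNat = (width-1).toNat := rfl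
          omega
        rw [hm, if_pos hmlt]
        obtain ⟨k, hk, hlo, hhi⟩ := rrDouble_spec bound (bound - x).toNat x le_rfl hx hxb
        rw [hk]
        have hexp : (width - 1).toNat = m.toNat + (width - 1 - m).toNat := by omega
        apply pow_mul_unique x bound _ k hx _ _ hlo hhi
        · rw [hbound, hexp, pow_add]
          exact mul_le_mul_of_nonneg_right hle (by positivity)
        · rw [hbound, two_mul]
          calc x * 2 ^ (width - 1 - m).toNat
              < 2 ^ (m.toNat + 1) * 2 ^ (width - 1 - m).toNat := by
                exact mul_lt_mul_of_pos_right hlt (by positivity)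
            _ = 2 ^ ((width - 1).toNat + 1) := by rw [← pow_add]; congr 1; omega
            _ = 2 ^ (width - 1).toNat + 2 ^ (width - 1).toNat := by rw [pow_succ]; ring
      · -- x already ≥ bound: first range element 1 hits, both return x
        rw [rrDouble_id bound x (by omega)]
        rw [PySem.List.pyRange_one_cons (by omega)]
        have ht : (2:Int) ^ (width - 1).toNat ≤ x := by omega
        simp only [rrMsbLoop, ht, if_pos]
        simp
    · -- x ≤ 0: loop never hits, both return x
      rw [rrDouble_id bound x (by omega), rrMsbLoop_nonpos x width (by omega)]
      simp
  · -- width < 1: empty range, default msb_index = width-1, both return x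
    rw [if_neg hw, PySem.List.pyRange_one_eq_nil (by omega)]
    simp [rrMsbLoop]
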